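-- pv_equiv track=rewrite | github.com/mcobrahacker/PythonLabs | Lab_6/lab_6_5/lab_6_5.py | IsPower5
-- ===== SOURCE A (Python) =====
-- def IsPower5(K):
--
--     if K < 5:
--         return False
--     else:
--         res = 1
--         i = 0
--         while res < K:
--             i = i + 1
--             res = res * 5
--         if res == K:
--             return True
--         else:
--             return False
-- ===== SOURCE B (Python) =====
-- def IsPower5(K):
--     if K < 5:
--         return False
--     n = K
--     while n % 5 == 0:
--         n //= 5
--     return n == 1
-- ===== Notes on version B (the rewrite author's own statement) =====
-- stated objective: simpler
-- what changed: B divides K by 5 top-down until no factor of 5 remains and tests for 1, instead of A's bottom-up loop multiplying 1 by 5 until it reaches or passes K.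
import Mathlib
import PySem

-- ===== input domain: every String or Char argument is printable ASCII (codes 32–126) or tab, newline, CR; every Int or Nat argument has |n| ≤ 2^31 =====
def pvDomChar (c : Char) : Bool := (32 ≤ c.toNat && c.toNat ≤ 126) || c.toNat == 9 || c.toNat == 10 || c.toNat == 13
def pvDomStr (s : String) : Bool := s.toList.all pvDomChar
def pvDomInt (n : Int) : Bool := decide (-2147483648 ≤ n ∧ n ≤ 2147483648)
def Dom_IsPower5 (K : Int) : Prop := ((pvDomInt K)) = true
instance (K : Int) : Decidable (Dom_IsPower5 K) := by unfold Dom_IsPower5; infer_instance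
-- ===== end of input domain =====

-- B tests powers of 5 by repeatedly dividing out factors of 5 (top-down) instead of
-- A's bottom-up multiply-until-reach loop; objective: simpler.

-- ===== PORT A =====
-- A's 'while res < K: i += 1; res *= 5' loop; carries 0 < res for termination.
def mulUpLoop (K res i : Int) (h : 0 < res) : Int × Int :=
  if hlt : res < K then mulUpLoop K (res * 5) (i + 1) (by omega) else (res, i)
termination_by (K - res).toNat
decreasing_by
  omega

def IsPower5 (K : Int) : Bool :=
  if K < 5 then false
  else
    let p := mulUpLoop K 1 0 (by omega)
    if p.1 = K then true else false

-- ===== PORT B =====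
-- B's 'while n % 5 == 0: n //= 5' loop; carries 0 < n for termination.
def divOutLoop (n : Int) (h : 0 < n) : Int :=
  if hm : PySem.Int.mod n 5 = 0 then
    divOutLoop (PySem.Int.floordiv n 5)
      (by rw [PySem.Int.floordiv_eq_ediv_of_pos (by omega)]
          rw [PySem.Int.mod_eq_emod_of_pos (by omega)] at hm
          omega)
  else n
termination_by n.toNat
decreasing_by
  rw [PySem.Int.floordiv_eq_ediv_of_pos (by omega)]
  rw [PySem.Int.mod_eq_emod_of_pos (by omega)] at hm
  omega

def IsPower5_alt (K : Int) : Bool :=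
  if h : K < 5 then false
  else decide (divOutLoop K (by omega) = 1)

-- ===== PRECONDITION & SPEC =====
def Spec_IsPower5 (K : Int) (out : Bool) : Prop := out = IsPower5_alt K
instance (K : Int) (out : Bool) : Decidable (Spec_IsPower5 K out) := by unfold Spec_IsPower5; infer_instance

-- ===== CLAIM (what is proved, stated in full; the proofs are below) =====
def Claim_equal_IsPower5 : Prop := ∀ (K : Int), Dom_IsPower5 K → Spec_IsPower5 K (IsPower5 K)

-- ===== LEMMAS AND PROOFS =====

-- A's loop hits K exactly when K = res · 5^j for some j.
theorem loopA_char (K res i : Int) (h : 0 < res) :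
    (mulUpLoop K res i h).1 = K ↔ ∃ j : ℕ, K = res * 5 ^ j := by
  induction res, i, h using mulUpLoop.induct K with
  | case1 res i h hlt ih =>
    rw [mulUpLoop, dif_pos hlt, ih]
    constructor
    · rintro ⟨j, hj⟩
      exact ⟨j + 1, by rw [hj]; ring⟩
    · rintro ⟨j, hj⟩
      cases j with
      | zero => simp at hj; omega
      | succ j => exact ⟨j, by rw [hj]; ring⟩
  | case2 res i h hlt =>
    rw [mulUpLoop, dif_neg hlt]
    constructor
    · intro he; exact ⟨0, by simpa using he.symm⟩
    · rintro ⟨j, hj⟩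
      have h5 : (1 : ℤ) ≤ 5 ^ j := one_le_pow₀ (by norm_num)
      have : res ≤ res * 5 ^ j := le_mul_of_one_le_right (by omega) h5
      simp only
      omega

-- B's loop reaches 1 exactly when n is a (nonnegative) power of 5.
theorem loopB_char (n : Int) (h : 0 < n) :
    divOutLoop n h = 1 ↔ ∃ j : ℕ, n = 5 ^ j := by
  induction n, h using divOutLoop.induct with
  | case1 n h hm ih =>
    rw [divOutLoop, dif_pos hm, ih]
    rw [PySem.Int.mod_eq_emod_of_pos (by omega)] at hm
    rw [PySem.Int.floordiv_eq_ediv_of_pos (by omega)]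
    constructor
    · rintro ⟨j, hj⟩
      refine ⟨j + 1, ?_⟩
      have hn : n = 5 * (n / 5) := by omega
      rw [hn, hj]; ring
    · rintro ⟨j, hj⟩
      cases j with
      | zero => simp at hj; omega
      | succ j =>
        refine ⟨j, ?_⟩
        rw [hj]
        have : (5:ℤ) ^ (j + 1) = 5 ^ j * 5 := by ring
        rw [this, Int.mul_ediv_cancel _ (by norm_num)]
  | case2 n h hm =>
    rw [divOutLoop, dif_neg hm]
    rw [PySem.Int.mod_eq_emod_of_pos (by omega)] at hm
    constructor
    · intro he; exact ⟨0, by simpa using he⟩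
    · rintro ⟨j, hj⟩
      cases j with
      | zero => simpa using hj
      | succ j =>
        exfalso; apply hm
        have : (5:ℤ) ∣ n := ⟨5 ^ j, by rw [hj]; ring⟩
        omega

-- ===== VERDICT (by name: the statement is the Claim_ definition above) =====
theorem IsPower5_spec : Claim_equal_IsPower5 := by
  intro K _
  unfold Spec_IsPower5 IsPower5 IsPower5_alt
  by_cases hK : K < 5
  · simp [hK]
  · simp only [if_neg hK]
    have hA := loopA_char K 1 0 (by omega)
    simp only [one_mul] at hA
    have hB := loopB_char K (by omega)
    by_cases hp : ∃ j : ℕ, K = 5 ^ j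
    · simp [hA.mpr hp, hB.mpr hp]
      omega
    · have h1 : ¬ (mulUpLoop K 1 0 (by omega)).1 = K := fun h => hp (hA.mp h)
      have h2 : ¬ divOutLoop K (by omega) = 1 := fun h => hp (hB.mp h)
      simp [h1, h2]
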